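-- pv_equiv track=rewrite | github.com/hippunk/NoitaDecode | utils.py | match_string
-- ===== SOURCE A (Python) =====
-- def match_string(list_a, list_b):
--     match = []
--     for i in range(len(list_a)) :
--         if list_a[i] == list_b[i] and list_b[i] != '0':
--             match.append(list_b[i])
--         else:
--             match.append(' ')
--     return " ".join(''.join(match).split())
-- ===== SOURCE B (Python) =====
-- def match_string(list_a, list_b):
--     tokens = []
--     cur = ""
--     for i in range(len(list_a)):
--         if list_a[i] == list_b[i] and list_b[i] != '0':
--             for ch in list_b[i]:
--                 if ch.isspace():
--                     if cur:
--                         tokens.append(cur)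
--                         cur = ""
--                 else:
--                     cur += ch
--         else:
--             if cur:
--                 tokens.append(cur)
--                 cur = ""
--     if cur:
--         tokens.append(cur)
--     return " ".join(tokens)
-- ===== Notes on version B (the rewrite author's own statement) =====
-- stated objective: alternative
-- what changed: B builds the whitespace-collapsed token list directly in a single segmentation pass (flush-on-whitespace accumulator) instead of materialising a padded character list, joining it into one string and re-splitting it.
import Mathlib
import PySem

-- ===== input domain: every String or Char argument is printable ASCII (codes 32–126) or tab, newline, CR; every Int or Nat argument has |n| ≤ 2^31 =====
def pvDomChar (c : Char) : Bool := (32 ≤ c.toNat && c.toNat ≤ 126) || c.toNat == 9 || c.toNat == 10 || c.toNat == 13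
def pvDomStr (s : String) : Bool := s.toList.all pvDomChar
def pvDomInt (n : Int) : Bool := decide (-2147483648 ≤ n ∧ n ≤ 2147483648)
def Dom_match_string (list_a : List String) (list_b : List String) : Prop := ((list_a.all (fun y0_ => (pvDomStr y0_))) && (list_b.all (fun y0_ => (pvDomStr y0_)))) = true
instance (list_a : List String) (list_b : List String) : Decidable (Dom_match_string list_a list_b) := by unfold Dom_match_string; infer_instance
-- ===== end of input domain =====

-- B builds the whitespace-collapsed token list in one pass by direct segmentation
-- instead of padding a char list and re-splitting it (objective: alternative decomposition).


-- ===== PORT A =====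
def match_string (list_a : List String) (list_b : List String) : String :=
  let mtch := (PySem.List.pyRange 0 (list_a.length : Int) 1).foldl
    (fun m i =>
      let a := PySem.List.pyGetD list_a i ""
      let b := PySem.List.pyGetD list_b i ""
      if a == b && !(b == "0") then m ++ [b] else m ++ [" "]) []
  PySem.Str.join " " (PySem.Str.split₀ (PySem.Str.join "" mtch))

-- ===== PORT B =====
-- one character of Source B's inner loop: flush the current token on whitespace, else extend it
def msAltStep (st : List (List Char) × List Char) (ch : Char) : List (List Char) × List Char :=
  if PySem.Chars.isspace ch then
    (if st.2.isEmpty then st.1 else st.1 ++ [st.2], [])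
  else (st.1, st.2 ++ [ch])

def match_string_alt (list_a : List String) (list_b : List String) : String :=
  let st := (PySem.List.pyRange 0 (list_a.length : Int) 1).foldl
    (fun st i =>
      let a := PySem.List.pyGetD list_a i ""
      let b := PySem.List.pyGetD list_b i ""
      if a == b && !(b == "0") then b.toList.foldl msAltStep st
      else (if st.2.isEmpty then st.1 else st.1 ++ [st.2], []))
    ([], [])
  let toks := if st.2.isEmpty then st.1 else st.1 ++ [st.2]
  PySem.Str.join " " (toks.map String.ofList)

-- ===== PRECONDITION & SPEC =====
-- A raises IndexError when list_b is shorter than list_a (and B does too); those inputs are excluded.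
def Pre_match_string (list_a : List String) (list_b : List String) : Prop :=
  list_a.length ≤ list_b.length
instance (list_a : List String) (list_b : List String) : Decidable (Pre_match_string list_a list_b) := by unfold Pre_match_string; infer_instance
def pvWitness_match_string : List String × List String := (["ab", "c", "0"], ["ab", "d", "0"])

def Spec_match_string (list_a : List String) (list_b : List String) (out : String) : Prop := out = match_string_alt list_a list_b
instance (list_a : List String) (list_b : List String) (out : String) : Decidable (Spec_match_string list_a list_b out) := by unfold Spec_match_string; infer_instance

-- ===== CLAIM (what is proved, stated in full; the proofs are below) =====
def Claim_equal_match_string : Prop := ∀ (list_a : List String) (list_b : List String), Dom_match_string list_a list_b → Pre_match_string list_a list_b → Spec_match_string list_a list_b (match_string list_a list_b)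

-- ===== LEMMAS AND PROOFS =====

-- finalize a segmentation state: flush the pending token
def msFin (st : List (List Char) × List Char) : List (List Char) :=
  if st.2.isEmpty then st.1 else st.1 ++ [st.2]

-- str.split() is the segmentation fold
theorem split₀_go_eq_fold (l : List Char) : ∀ (cur : List Char) (acc : List (List Char)),
    PySem.Chars.split₀.go l cur acc = msFin (l.foldl msAltStep (acc.reverse, cur.reverse)) := by
  induction l with
  | nil =>
    intro cur acc
    by_cases h : cur = [] <;> simp [PySem.Chars.split₀.go, msFin, h]
  | cons c rest ih =>
    intro cur acc
    simp only [List.foldl_cons]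
    by_cases hs : PySem.Chars.isspace c = true
    · by_cases h : cur = []
      · simp [PySem.Chars.split₀.go, hs, h, ih, msAltStep]
      · rw [show PySem.Chars.split₀.go (c :: rest) cur acc = PySem.Chars.split₀.go rest [] (cur.reverse :: acc) by
              simp [PySem.Chars.split₀.go, hs, h], ih]
        simp [msAltStep, hs, List.isEmpty_iff, h]
    · rw [show PySem.Chars.split₀.go (c :: rest) cur acc = PySem.Chars.split₀.go rest (c :: cur) acc by
            simp [PySem.Chars.split₀.go, hs], ih]
      simp [msAltStep, hs]

theorem split₀_eq_fold (l : List Char) :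
    PySem.Chars.split₀ l = msFin (l.foldl msAltStep ([], [])) := by
  simpa using split₀_go_eq_fold l [] []

-- [].intercalate = flatten
theorem intercalate_nil_eq_flatten (l : List (List Char)) :
    ([] : List Char).intercalate l = l.flatten := by
  induction l with
  | nil => simp [List.intercalate]
  | cons x xs ih =>
    cases xs with
    | nil => simp [List.intercalate]
    | cons y ys =>
      simp only [List.intercalate, List.intersperse] at *
      simp_all

-- index folds over both lists become a fold over the zipped lists
theorem foldl_range_getD_zip {σ : Type} (la : List String) :
    ∀ (lb : List String) (f : σ → String → String → σ) (init : σ),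
    la.length ≤ lb.length →
    (List.range la.length).foldl (fun s i => f s (la.getD i "") (lb.getD i "")) init
      = (la.zip lb).foldl (fun s p => f s p.1 p.2) init := by
  induction la with
  | nil => intro lb f init _; simp
  | cons x la' ih =>
    intro lb f init h
    cases lb with
    | nil => simp at h
    | cons y lb' =>
      simp only [List.length_cons, List.range_succ_eq_map, List.foldl_cons, List.foldl_map,
        List.zip_cons_cons, List.getD_cons_zero, List.getD_cons_succ]
      exact ih lb' (fun s a b => f s a b) (f init x y) (by simpa using h)

theorem foldl_pyRange_getD_zip {σ : Type} (la lb : List String)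
    (f : σ → String → String → σ) (init : σ) (h : la.length ≤ lb.length) :
    (PySem.List.pyRange 0 (la.length : Int) 1).foldl
      (fun s i => f s (PySem.List.pyGetD la i "") (PySem.List.pyGetD lb i "")) init
      = (la.zip lb).foldl (fun s p => f s p.1 p.2) init := by
  rw [PySem.List.pyRange_zero_natCast la.length, List.foldl_map]
  simp only [PySem.List.pyGetD_natCast]
  exact foldl_range_getD_zip la lb f init h

theorem map_toList_ofList (l : List (List Char)) :
    l.map (String.toList ∘ String.ofList) = l := by
  simp [Function.comp_def]

-- the matched test, shared by both ports
def msKeep (p : String × String) : Bool := p.1 == p.2 && !(p.2 == "0")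

-- A's character stream
def msStream (la lb : List String) : List Char :=
  ((la.zip lb).map (fun p => if msKeep p then p.2.toList else [' '])).flatten

theorem A_eq (la lb : List String) (h : la.length ≤ lb.length) :
    match_string la lb = String.ofList (PySem.Chars.join [' '] (msFin ((msStream la lb).foldl msAltStep ([], [])))) := by
  unfold match_string
  rw [foldl_pyRange_getD_zip la lb (fun m a b => if a == b && !(b == "0") then m ++ [b] else m ++ [" "]) [] h]
  have hstep : ∀ (m : List String) (p : String × String),
      (if p.1 == p.2 && !(p.2 == "0") then m ++ [p.2] else m ++ [" "])
        = m ++ [if msKeep p then p.2 else " "] := by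
    intro m p; unfold msKeep; split_ifs <;> rfl
  simp only [hstep, PySem.List.foldl_append_singleton_eq_map, List.nil_append]
  have hL : (PySem.Str.join "" ((la.zip lb).map (fun p => if msKeep p then p.2 else " "))).toList
      = msStream la lb := by
    simp only [PySem.Str.join, PySem.Chars.join, String.toList_ofList, List.map_map, msStream]
    rw [show "".toList = ([] : List Char) from rfl, intercalate_nil_eq_flatten]
    congr 1
    apply List.map_congr_left
    intro p _
    simp only [Function.comp]
    split_ifs <;> rfl
  rw [show PySem.Str.join " " (PySem.Str.split₀ (PySem.Str.join "" ((la.zip lb).map (fun p => if msKeep p then p.2 else " "))))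
        = PySem.Str.join " " ((PySem.Chars.split₀ (msStream la lb)).map String.ofList) by
      simp [PySem.Str.split₀, hL]]
  rw [split₀_eq_fold]
  simp only [PySem.Str.join, PySem.Chars.join, List.map_map]
  rw [map_toList_ofList]
  rfl

theorem B_eq (la lb : List String) (h : la.length ≤ lb.length) :
    match_string_alt la lb = String.ofList (PySem.Chars.join [' '] (msFin ((msStream la lb).foldl msAltStep ([], [])))) := by
  unfold match_string_alt
  rw [foldl_pyRange_getD_zip la lb
    (fun st a b => if a == b && !(b == "0") then b.toList.foldl msAltStep st
      else (if st.2.isEmpty then st.1 else st.1 ++ [st.2], [])) ([], []) h]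
  have hstep : ∀ (st : List (List Char) × List Char) (p : String × String),
      (if p.1 == p.2 && !(p.2 == "0") then p.2.toList.foldl msAltStep st
        else (if st.2.isEmpty then st.1 else st.1 ++ [st.2], []))
        = (if msKeep p then p.2.toList else [' ']).foldl msAltStep st := by
    intro st p; unfold msKeep
    by_cases h1 : (p.1 == p.2 && !(p.2 == "0")) = true
    · simp [h1]
    · simp [h1, msAltStep, show PySem.Chars.isspace ' ' = true from by decide, List.isEmpty_iff]
  simp only [hstep]
  rw [show ((la.zip lb).foldl (fun st p => (if msKeep p then p.2.toList else [' ']).foldl msAltStep st) ([], []))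
        = (msStream la lb).foldl msAltStep ([], []) by
      simp [msStream, List.foldl_flatten, List.foldl_map]]
  simp only [msFin, PySem.Str.join, PySem.Chars.join, List.map_map]
  rw [map_toList_ofList]
  rfl

-- ===== VERDICT (by name: the statement is the Claim_ definition above) =====
theorem match_string_spec : Claim_equal_match_string := by
  intro la lb _ hpre
  unfold Spec_match_string
  rw [A_eq la lb hpre, B_eq la lb hpre]
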